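-- pv_equiv track=rewrite | github.com/Mortalus/Ansvar-Threat-Advisory | apps/api/app/core/pipeline/steps/threat_generator_v3.py | _get_recommended_actions
-- ===== SOURCE A (Python) =====
-- from typing import Dict, Any, List, Optional
--
-- def _get_recommended_actions(threats: List[Dict[str, Any]]) -> List[str]:
--     """Generate prioritized recommendations."""
--     actions = []
--
--     # Check for common patterns in top threats
--     top_threats = threats[:10]
--
--     if any('authentication' in t.get('Description', '').lower() for t in top_threats):
--         actions.append("Strengthen authentication mechanisms (MFA, OAuth2)")
--
--     if any('encryption' in t.get('Suggested Mitigation', '').lower() for t in top_threats):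
--         actions.append("Implement end-to-end encryption for sensitive data")
--
--     if any('single point' in t.get('Description', '').lower() for t in top_threats):
--         actions.append("Add redundancy to critical components")
--
--     if any('compliance' in t.get('threat_class', '') for t in top_threats):
--         actions.append("Conduct compliance audit and implement required controls")
--
--     if any('monitoring' in t.get('Suggested Mitigation', '').lower() for t in top_threats):
--         actions.append("Enhance monitoring and alerting capabilities")
--
--     return actions[:5]
-- ===== SOURCE B (Python) =====
-- # Table-driven: one rules table, threat-major pass collecting triggered
-- # messages into a set, then the table filtered by membership.
-- _RULES = [
--     ("authentication", "Description", True,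
--      "Strengthen authentication mechanisms (MFA, OAuth2)"),
--     ("encryption", "Suggested Mitigation", True,
--      "Implement end-to-end encryption for sensitive data"),
--     ("single point", "Description", True,
--      "Add redundancy to critical components"),
--     ("compliance", "threat_class", False,
--      "Conduct compliance audit and implement required controls"),
--     ("monitoring", "Suggested Mitigation", True,
--      "Enhance monitoring and alerting capabilities"),
-- ]
--
-- def _get_recommended_actions(threats):
--     """Generate prioritized recommendations (rule table + triggered set)."""
--     triggered = set()
--     for t in threats[:10]:
--         for keyword, field, fold_case, message in _RULES:
--             value = t.get(field, '')
--             if fold_case: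
--                 value = value.lower()
--             if keyword in value:
--                 triggered.add(message)
--     return [msg for _, _, _, msg in _RULES if msg in triggered]
-- ===== Notes on version B (the rewrite author's own statement) =====
-- stated objective: alternative
-- what changed: B is table-driven: the five hard-coded if-blocks become one declarative rules table (keyword, field, case-fold flag, message); a threat-major nested loop over threats[:10] x rules collects triggered messages into a set, and the result is the table filtered by set membership, so adding a rule is a data change rather than a code change.
import Mathlib
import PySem

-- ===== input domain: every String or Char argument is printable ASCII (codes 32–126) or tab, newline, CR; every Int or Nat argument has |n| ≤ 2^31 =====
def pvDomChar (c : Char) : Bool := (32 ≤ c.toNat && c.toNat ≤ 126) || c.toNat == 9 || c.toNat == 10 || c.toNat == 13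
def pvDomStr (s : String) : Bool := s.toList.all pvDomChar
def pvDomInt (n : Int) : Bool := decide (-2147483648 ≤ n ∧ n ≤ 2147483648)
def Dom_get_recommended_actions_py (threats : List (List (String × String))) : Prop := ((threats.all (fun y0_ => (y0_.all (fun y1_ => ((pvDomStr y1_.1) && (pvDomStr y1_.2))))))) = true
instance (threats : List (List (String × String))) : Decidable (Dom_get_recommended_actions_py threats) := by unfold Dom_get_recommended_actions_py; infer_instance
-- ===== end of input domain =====

-- B replaces A's five hard-coded any()-guarded if-blocks by a declarative rules table with a
-- threat-major pass collecting triggered messages into a set, then filters the table (objective: alternative).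

-- t.get(key, '') : first-match association-list lookup with default ''
def pvGetD (t : List (String × String)) (k : String) : String :=
  (PySem.Dict.mk t).getD k ""

-- ===== PORT A =====
def pvChkAuth (t : List (String × String)) : Bool :=
  PySem.Str.isIn "authentication" (PySem.Str.lower (pvGetD t "Description"))
def pvChkEnc (t : List (String × String)) : Bool :=
  PySem.Str.isIn "encryption" (PySem.Str.lower (pvGetD t "Suggested Mitigation"))
def pvChkSpof (t : List (String × String)) : Bool :=
  PySem.Str.isIn "single point" (PySem.Str.lower (pvGetD t "Description"))
def pvChkComp (t : List (String × String)) : Bool :=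
  PySem.Str.isIn "compliance" (pvGetD t "threat_class")   -- note: no .lower(), as in the Python
def pvChkMon (t : List (String × String)) : Bool :=
  PySem.Str.isIn "monitoring" (PySem.Str.lower (pvGetD t "Suggested Mitigation"))

def get_recommended_actions_py (threats : List (List (String × String))) : List String :=
  let actions : List String := []
  let top_threats := PySem.List.slice threats none (some 10)
  let actions := if top_threats.any pvChkAuth then actions ++ ["Strengthen authentication mechanisms (MFA, OAuth2)"] else actions
  let actions := if top_threats.any pvChkEnc then actions ++ ["Implement end-to-end encryption for sensitive data"] else actions
  let actions := if top_threats.any pvChkSpof then actions ++ ["Add redundancy to critical components"] else actions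
  let actions := if top_threats.any pvChkComp then actions ++ ["Conduct compliance audit and implement required controls"] else actions
  let actions := if top_threats.any pvChkMon then actions ++ ["Enhance monitoring and alerting capabilities"] else actions
  PySem.List.slice actions none (some 5)

-- ===== PORT B =====
-- _RULES : (keyword, field, case-fold flag, message)
def pvRules : List (String × String × Bool × String) :=
  [("authentication", "Description", true, "Strengthen authentication mechanisms (MFA, OAuth2)"),
   ("encryption", "Suggested Mitigation", true, "Implement end-to-end encryption for sensitive data"),
   ("single point", "Description", true, "Add redundancy to critical components"),
   ("compliance", "threat_class", false, "Conduct compliance audit and implement required controls"),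
   ("monitoring", "Suggested Mitigation", true, "Enhance monitoring and alerting capabilities")]

-- does rule r fire on threat t (the inner-loop body's test)
def pvRuleFires (r : String × String × Bool × String) (t : List (String × String)) : Bool :=
  let value := pvGetD t r.2.1
  let value := if r.2.2.1 then PySem.Str.lower value else value
  PySem.Str.isIn r.1 value

def get_recommended_actions_py_alt (threats : List (List (String × String))) : List String :=
  let triggered : PySem.Set String :=
    (PySem.List.slice threats none (some 10)).foldl
      (fun s t => pvRules.foldl
        (fun s r => if pvRuleFires r t then PySem.Set.add s r.2.2.2 else s) s)
      PySem.Set.empty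
  (pvRules.filter (fun r => PySem.Set.contains triggered r.2.2.2)).map (fun r => r.2.2.2)

-- ===== PRECONDITION & SPEC =====
def Spec_get_recommended_actions_py (threats : List (List (String × String))) (out : List String) : Prop := out = get_recommended_actions_py_alt threats
instance (threats : List (List (String × String))) (out : List String) : Decidable (Spec_get_recommended_actions_py threats out) := by unfold Spec_get_recommended_actions_py; infer_instance

-- ===== CLAIM (what is proved, stated in full; the proofs are below) =====
def Claim_equal_get_recommended_actions_py : Prop := ∀ (threats : List (List (String × String))), Dom_get_recommended_actions_py threats → Spec_get_recommended_actions_py threats (get_recommended_actions_py threats)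

-- ===== LEMMAS AND PROOFS =====

-- membership after the inner (rules) fold
set_option maxHeartbeats 1000000 in
theorem pv_mem_inner (rules : List (String × String × Bool × String))
    (t : List (String × String)) (s : PySem.Set String) (m : String) :
    (m ∈ rules.foldl (fun s r => if pvRuleFires r t then PySem.Set.add s r.2.2.2 else s) s) ↔
      m ∈ s ∨ ∃ r ∈ rules, pvRuleFires r t ∧ m = r.2.2.2 := by
  induction rules generalizing s with
  | nil => simp
  | cons r rs ih =>
    simp only [List.foldl_cons, ih]
    by_cases h : pvRuleFires r t <;> simp [h, PySem.Set.mem_add, or_assoc]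

-- membership after the outer (threats) fold
set_option maxHeartbeats 1000000 in
theorem pv_mem_outer (l : List (List (String × String))) (s : PySem.Set String) (m : String) :
    (m ∈ l.foldl
        (fun s t => pvRules.foldl
          (fun s r => if pvRuleFires r t then PySem.Set.add s r.2.2.2 else s) s) s) ↔
      m ∈ s ∨ ∃ t ∈ l, ∃ r ∈ pvRules, pvRuleFires r t ∧ m = r.2.2.2 := by
  induction l generalizing s with
  | nil => simp
  | cons x xs ih =>
    simp only [List.foldl_cons, ih, pv_mem_inner]
    simp [or_assoc]

theorem pv_fire1 : ∀ t, pvRuleFires ("authentication", "Description", true, "Strengthen authentication mechanisms (MFA, OAuth2)") t = pvChkAuth t := fun _ => rfl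
theorem pv_fire2 : ∀ t, pvRuleFires ("encryption", "Suggested Mitigation", true, "Implement end-to-end encryption for sensitive data") t = pvChkEnc t := fun _ => rfl
theorem pv_fire3 : ∀ t, pvRuleFires ("single point", "Description", true, "Add redundancy to critical components") t = pvChkSpof t := fun _ => rfl
theorem pv_fire4 : ∀ t, pvRuleFires ("compliance", "threat_class", false, "Conduct compliance audit and implement required controls") t = pvChkComp t := fun _ => rfl
theorem pv_fire5 : ∀ t, pvRuleFires ("monitoring", "Suggested Mitigation", true, "Enhance monitoring and alerting capabilities") t = pvChkMon t := fun _ => rfl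

-- ===== VERDICT (by name: the statement is the Claim_ definition above) =====
set_option maxHeartbeats 2000000 in
theorem get_recommended_actions_py_spec : Claim_equal_get_recommended_actions_py := by
  intro threats _
  show get_recommended_actions_py threats = get_recommended_actions_py_alt threats
  unfold get_recommended_actions_py get_recommended_actions_py_alt
  have hmem : ∀ m, PySem.Set.contains
      ((PySem.List.slice threats none (some 10)).foldl
        (fun s t => pvRules.foldl
          (fun s r => if pvRuleFires r t then PySem.Set.add s r.2.2.2 else s) s)
        PySem.Set.empty) m
      = (PySem.List.slice threats none (some 10)).any
          (fun t => pvRules.any (fun r => pvRuleFires r t && r.2.2.2 == m)) := by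
    intro m
    rw [Bool.eq_iff_iff, PySem.Set.contains_iff, pv_mem_outer]
    simp only [PySem.Set.empty, List.not_mem_nil, false_or, List.any_eq_true,
      Bool.and_eq_true, beq_iff_eq]
    constructor
    · rintro ⟨t, ht, r, hr, hf, rfl⟩; exact ⟨t, ht, r, hr, hf, rfl⟩
    · rintro ⟨t, ht, r, hr, hf, h⟩; exact ⟨t, ht, r, hr, hf, h.symm⟩
  simp only [hmem]
  simp only [pvRules, List.filter_cons, List.filter_nil,
    List.any_cons, List.any_nil, pv_fire1, pv_fire2, pv_fire3, pv_fire4, pv_fire5]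
  simp only [String.reduceBEq, beq_self_eq_true, Bool.and_false, Bool.and_true,
    Bool.or_false, Bool.false_or]
  split_ifs <;> simp [PySem.List.slice]
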